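-- pv_equiv track=rewrite | github.com/Nareeek/Codesignal_tasks | python/digit/squareDigitsSequence.py | squareDigitsSequence
-- ===== SOURCE A (Python) =====
-- def squareDigitsSequence(a0):
--
--     cur = a0
--     was = set()
--
--     while not (cur in was):
--         was.add(cur)
--         nxt = 0
--         while cur > 0:
--             nxt += (cur % 10) * (cur % 10)
--             cur //= 10
--         cur = nxt
--
--     return len(was) + 1
-- ===== SOURCE B (Python) =====
-- # Different algorithm: no visited-set; walk the orbit until it hits one of the
-- # known attractor cycles of the square-digit-sum map ({0}, {1}, or the 8-cycle
-- # 4,16,37,58,89,145,42,20), then answer = tail length + cycle length + 1.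
-- _CYCLE = {0: 1, 1: 1, 4: 8, 16: 8, 37: 8, 58: 8, 89: 8, 145: 8, 42: 8, 20: 8}
--
--
-- def _f(x):
--     s = 0
--     while x > 0:
--         s += (x % 10) * (x % 10)
--         x //= 10
--     return s
--
--
-- def squareDigitsSequence(a0):
--     cur = a0
--     steps = 0
--     while cur not in _CYCLE:
--         steps += 1
--         cur = _f(cur)
--     return steps + _CYCLE[cur] + 1
-- ===== Notes on version B (the rewrite author's own statement) =====
-- stated objective: alternative
-- what changed: Instead of growing a visited set until the current value repeats, B walks the orbit only until it hits one of the known attractor cycles of the square-digit-sum map ({0}, {1}, or the 8-cycle 4,16,37,58,89,145,42,20) and returns tail length + hard-coded cycle length + 1, with no set at all.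
import Mathlib
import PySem

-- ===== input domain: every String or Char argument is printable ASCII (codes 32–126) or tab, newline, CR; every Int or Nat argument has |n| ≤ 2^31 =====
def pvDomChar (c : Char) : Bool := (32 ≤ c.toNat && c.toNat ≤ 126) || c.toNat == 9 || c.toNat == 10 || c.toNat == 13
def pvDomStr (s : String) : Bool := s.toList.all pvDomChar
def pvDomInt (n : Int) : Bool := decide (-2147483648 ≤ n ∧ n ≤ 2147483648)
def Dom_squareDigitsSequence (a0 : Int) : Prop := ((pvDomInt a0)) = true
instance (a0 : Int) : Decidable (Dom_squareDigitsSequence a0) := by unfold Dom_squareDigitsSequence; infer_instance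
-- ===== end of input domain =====

-- B walks the orbit only until it reaches a known attractor cycle of the square-digit-sum
-- map and adds the hard-coded cycle length, instead of maintaining a visited set (alternative).

-- ===== PORT A =====
-- inner 'while cur > 0' loop of A (the fuel 40 only makes it total; ≤ 11 digits on Dom)
def sqAuxA : Int → Int → Nat → Int
  | _, nxt, 0 => nxt
  | cur, nxt, fuel+1 =>
    if 0 < cur then
      sqAuxA (PySem.Int.floordiv cur 10) (nxt + PySem.Int.mod cur 10 * PySem.Int.mod cur 10) fuel
    else nxt

def sqNextA (cur nxt : Int) : Int := sqAuxA cur nxt 40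

-- outer 'while not (cur in was)' loop; the fuel (1000, never exhausted on Dom) only makes it total
def loopA : Int → PySem.Set Int → Nat → Int
  | _, was, 0 => (was.length : Int) + 1
  | cur, was, fuel+1 =>
    if PySem.Set.contains was cur then (was.length : Int) + 1
    else loopA (sqNextA cur 0) (PySem.Set.add was cur) fuel

def squareDigitsSequence (a0 : Int) : Int :=
  loopA a0 PySem.Set.empty 1000

-- ===== PORT B =====
def cycleB : PySem.Dict Int Int :=
  PySem.Dict.ofList [((0:Int),(1:Int)),(1,1),(4,8),(16,8),(37,8),(58,8),(89,8),(145,8),(42,8),(20,8)]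

-- Source B's helper _f (its 'while x > 0' loop; the fuel 40 only makes it total)
def fAuxB : Int → Int → Nat → Int
  | _, s, 0 => s
  | x, s, fuel+1 =>
    if 0 < x then
      fAuxB (PySem.Int.floordiv x 10) (s + PySem.Int.mod x 10 * PySem.Int.mod x 10) fuel
    else s

def fB (x : Int) : Int := fAuxB x 0 40

-- Source B's 'while cur not in _CYCLE' loop; the fuel (1000, never exhausted on Dom) only makes it total
def loopB : Int → Int → Nat → Int
  | _, steps, 0 => steps
  | cur, steps, fuel+1 =>
    if PySem.Dict.contains cycleB cur then steps + PySem.Dict.getD cycleB cur 0 + 1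
    else loopB (fB cur) (steps + 1) fuel

def squareDigitsSequence_alt (a0 : Int) : Int :=
  loopB a0 0 1000

-- ===== PRECONDITION & SPEC =====
def Spec_squareDigitsSequence (a0 : Int) (out : Int) : Prop := out = squareDigitsSequence_alt a0
instance (a0 : Int) (out : Int) : Decidable (Spec_squareDigitsSequence a0 out) := by unfold Spec_squareDigitsSequence; infer_instance

-- ===== CLAIM (what is proved, stated in full; the proofs are below) =====
def Claim_equal_squareDigitsSequence : Prop := ∀ (a0 : Int), Dom_squareDigitsSequence a0 → Spec_squareDigitsSequence a0 (squareDigitsSequence a0)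

-- ===== LEMMAS AND PROOFS =====

lemma fAuxB_eq_sqAuxA : ∀ (fuel : Nat) (x s : Int), fAuxB x s fuel = sqAuxA x s fuel := by
  intro fuel
  induction fuel with
  | zero => intro x s; rfl
  | succ fuel ih =>
    intro x s
    rw [fAuxB, sqAuxA]
    split
    · exact ih _ _
    · rfl

lemma mod10_bounds (x : Int) : 0 ≤ PySem.Int.mod x 10 ∧ PySem.Int.mod x 10 < 10 := by
  have h10 : (0:Int) < 10 := by norm_num
  rw [PySem.Int.mod_eq_emod_of_pos h10]
  omega

lemma sqAuxA_ge : ∀ (fuel : Nat) (x s : Int), s ≤ sqAuxA x s fuel := by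
  intro fuel
  induction fuel with
  | zero => intro x s; exact le_refl s
  | succ fuel ih =>
    intro x s
    rw [sqAuxA]
    split
    · have hm := mod10_bounds x
      have := ih (PySem.Int.floordiv x 10) (s + PySem.Int.mod x 10 * PySem.Int.mod x 10)
      nlinarith
    · exact le_refl s

lemma sqAuxA_nonpos (fuel : Nat) (x s : Int) (hx : ¬ 0 < x) : sqAuxA x s fuel = s := by
  cases fuel with
  | zero => rfl
  | succ fuel => rw [sqAuxA, if_neg hx]

lemma sqAuxA_le : ∀ (k fuel : Nat) (x s : Int), x < 10 ^ k → k ≤ fuel →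
    sqAuxA x s fuel ≤ s + 81 * k := by
  intro k
  induction k with
  | zero =>
    intro fuel x s hx _
    rw [sqAuxA_nonpos fuel x s (by omega)]
    simp
  | succ k ih =>
    intro fuel x s hx hk
    obtain ⟨fuel', rfl⟩ : ∃ f', fuel = f' + 1 := ⟨fuel - 1, by omega⟩
    rw [sqAuxA]
    split
    · rename_i hpos
      have h10 : (0:Int) < 10 := by norm_num
      have hdiv : PySem.Int.floordiv x 10 < 10 ^ k := by
        rw [PySem.Int.floordiv_eq_ediv_of_pos h10]
        have : x < 10 ^ k * 10 := by rw [pow_succ] at hx; linarith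
        omega
      have hm := mod10_bounds x
      have hsq : PySem.Int.mod x 10 * PySem.Int.mod x 10 ≤ 81 := by nlinarith
      have := ih fuel' (PySem.Int.floordiv x 10) (s + PySem.Int.mod x 10 * PySem.Int.mod x 10)
        hdiv (by omega)
      push_cast
      push_cast at this
      linarith
    · have : (0:Int) ≤ 81 * ((k:Int) + 1) := by positivity
      push_cast
      linarith

lemma sqNextA_ge (x s : Int) : s ≤ sqNextA x s := sqAuxA_ge 40 x s

lemma sqNextA_le (k : Nat) (x s : Int) (hx : x < 10 ^ k) (hk : k ≤ 40) :
    sqNextA x s ≤ s + 81 * k := sqAuxA_le k 40 x s hx hk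

-- shifting the steps accumulator out of B's loop
lemma loopB_shift : ∀ (fuel : Nat) (cur steps : Int),
    loopB cur steps fuel = steps + loopB cur 0 fuel := by
  intro fuel
  induction fuel with
  | zero => intro cur steps; simp [loopB]
  | succ fuel ih =>
    intro cur steps
    rw [loopB, loopB]
    split
    · ring
    · rw [ih (fB cur) (steps + 1), ih (fB cur) (0 + 1)]; ring

-- an out-of-range head of the visited set never matches and only adds 1 to the length
lemma loopA_cons (a0 : Int) (ha : a0 < 0 ∨ 810 < a0) :
    ∀ (fuel : Nat) (cur : Int) (ws : List Int),
      0 ≤ cur → cur ≤ 810 → (∀ y ∈ ws, 0 ≤ y ∧ y ≤ 810) →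
      loopA cur (a0 :: ws) fuel = loopA cur ws fuel + 1 := by
  intro fuel
  induction fuel with
  | zero => intro cur ws _ _ _; simp only [loopA, List.length_cons]; push_cast; ring
  | succ fuel ih =>
    intro cur ws h0 h810 hws
    have hca : ¬ cur = a0 := by omega
    by_cases hc : cur ∈ ws
    · rw [loopA, loopA,
        if_pos ((PySem.Set.contains_iff _ cur).mpr (List.mem_cons_of_mem _ hc)),
        if_pos ((PySem.Set.contains_iff ws cur).mpr hc)]
      simp only [List.length_cons]
      push_cast
      ring
    · have hnc1 : ¬ PySem.Set.contains ws cur = true := by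
        intro h; exact hc ((PySem.Set.contains_iff ws cur).mp h)
      have hnc2 : ¬ PySem.Set.contains (a0 :: ws) cur = true := by
        intro h
        rcases List.mem_cons.mp ((PySem.Set.contains_iff _ cur).mp h) with h' | h'
        · exact hca h'
        · exact hc h'
      rw [loopA, loopA, if_neg hnc2, if_neg hnc1]
      have haddw : PySem.Set.add ws cur = ws ++ [cur] := by
        rw [PySem.Set.add]
        rw [if_neg hnc1]
      have hadd2 : PySem.Set.add (a0 :: ws) cur = a0 :: PySem.Set.add ws cur := by
        rw [PySem.Set.add, if_neg hnc2, haddw]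
        rfl
      rw [hadd2, haddw]
      have hnext0 : 0 ≤ sqNextA cur 0 := sqNextA_ge cur 0
      have hnext810 : sqNextA cur 0 ≤ 810 := by
        have := sqNextA_le 3 cur 0 (by norm_num; omega) (by norm_num)
        push_cast at this; linarith
      apply ih (sqNextA cur 0) (ws ++ [cur]) hnext0 hnext810
      intro y hy
      rcases List.mem_append.mp hy with hy | hy
      · exact hws y hy
      · simp at hy; subst hy; exact ⟨h0, h810⟩

set_option maxRecDepth 100000 in
set_option maxHeartbeats 4000000 in
lemma main_fin : ∀ x ∈ List.range 811,
    loopA (x : Int) PySem.Set.empty 999 = loopB (x : Int) 0 999 ∧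
    loopA (x : Int) PySem.Set.empty 1000 = loopB (x : Int) 0 1000 := by
  decide

lemma cycleB_not_contains (a0 : Int) (ha : a0 < 0 ∨ 810 < a0) :
    PySem.Dict.contains cycleB a0 = false := by
  rw [PySem.Dict.contains_eq_decide_mem_keys]
  have hk : PySem.Dict.keys cycleB = [0, 1, 4, 16, 37, 58, 89, 145, 42, 20] := by decide
  rw [hk]
  simp
  omega

-- ===== VERDICT (by name: the statement is the Claim_ definition above) =====
theorem squareDigitsSequence_spec : Claim_equal_squareDigitsSequence := by
  intro a0 hdom
  unfold Spec_squareDigitsSequence squareDigitsSequence squareDigitsSequence_alt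
  have hdom' : -2147483648 ≤ a0 ∧ a0 ≤ 2147483648 := by
    unfold Dom_squareDigitsSequence pvDomInt at hdom
    exact of_decide_eq_true hdom
  by_cases hin : 0 ≤ a0 ∧ a0 ≤ 810
  · have hx : a0.toNat ∈ List.range 811 := by
      simp [List.mem_range]; omega
    have := (main_fin a0.toNat hx).2
    rwa [Int.toNat_of_nonneg hin.1] at this
  · have ha : a0 < 0 ∨ 810 < a0 := by omega
    have hstepA : loopA a0 PySem.Set.empty 1000 = loopA (sqNextA a0 0) [a0] 999 := by
      rw [show (1000:Nat) = 999+1 from rfl, loopA, if_neg (by simp [PySem.Set.empty])]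
      rfl
    have hfb : fB a0 = sqNextA a0 0 := by
      rw [fB, sqNextA, fAuxB_eq_sqAuxA]
    have hstepB : loopB a0 0 1000 = 1 + loopB (sqNextA a0 0) 0 999 := by
      rw [show (1000:Nat) = 999+1 from rfl, loopB,
        if_neg (by simp [cycleB_not_contains a0 ha]), hfb, loopB_shift]
      ring
    have hnext0 : 0 ≤ sqNextA a0 0 := sqNextA_ge a0 0
    have hnext810 : sqNextA a0 0 ≤ 810 := by
      have := sqNextA_le 10 a0 0 (by norm_num; omega) (by norm_num)
      push_cast at this; linarith
    have hcons := loopA_cons a0 ha 999 (sqNextA a0 0) [] hnext0 hnext810 (by simp)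
    have hx : (sqNextA a0 0).toNat ∈ List.range 811 := by
      simp [List.mem_range]; omega
    have hfin := (main_fin (sqNextA a0 0).toNat hx).1
    rw [Int.toNat_of_nonneg hnext0] at hfin
    rw [hstepA, show ([a0] : PySem.Set Int) = a0 :: [] from rfl, hcons, hstepB]
    rw [show ([] : PySem.Set Int) = PySem.Set.empty from rfl, hfin]
    ring
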